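-- pv_equiv track=rewrite | github.com/Kumamoto-Hamachi/atcoder_pr | abc_contest/abc188/c/c.py | tounament
-- ===== SOURCE A (Python) =====
-- from copy import copy
--
-- def tounament(a_l, limit):
--     new_l = limit // 2
--     tmp_l = [None] * new_l
--     for a, b in enumerate(range(0, limit, 2)):
--         tmp_l[a] = max(a_l[b] ,a_l[b+1])
--     a_l = copy(tmp_l)
--     if len(a_l) <= 2:
--         return a_l
--     limit = len(a_l)
--     return tounament(a_l, limit)
-- ===== SOURCE B (Python) =====
-- def tounament(a_l, limit):
--     if limit <= 0:
--         return []
--     if limit == 2: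
--         return [max(a_l[0], a_l[1])]
--     half = limit // 2
--     return [max(a_l[:half]), max(a_l[half:limit])]
-- ===== Notes on version B (the rewrite author's own statement) =====
-- stated objective: alternative
-- what changed: Replaces the recursive round-by-round pairwise-maximum reduction with a direct closed form: on the inputs where A terminates (limit <= 0, or limit a power of two within the list) the result is just [] / the max of the first two elements / the maxima of the two halves of the first limit elements, computed with two slice-max calls and no loop or recursion.
import Mathlib
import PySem

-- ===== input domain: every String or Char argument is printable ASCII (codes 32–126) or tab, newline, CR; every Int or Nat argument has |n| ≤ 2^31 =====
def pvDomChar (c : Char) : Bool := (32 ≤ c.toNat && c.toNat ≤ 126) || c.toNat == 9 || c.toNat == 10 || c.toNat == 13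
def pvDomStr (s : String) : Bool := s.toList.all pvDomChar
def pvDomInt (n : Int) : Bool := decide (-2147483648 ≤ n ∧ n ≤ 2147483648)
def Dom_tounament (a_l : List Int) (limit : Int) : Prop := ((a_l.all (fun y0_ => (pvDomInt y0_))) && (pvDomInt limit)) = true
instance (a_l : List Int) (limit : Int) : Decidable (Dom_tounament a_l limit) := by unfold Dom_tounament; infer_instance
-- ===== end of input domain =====

-- B replaces A's recursive round-by-round pairwise-maximum reduction by a closed form (empty
-- list / max of the first pair / the maxima of the two halves of the first `limit` elements);
-- the return values agree on every input on which A returns (Pre_ below).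

-- ===== PORT A =====
-- used by the port's decreasing_by: the index-assignment loop never changes the list's length
theorem pvFoldSetLen (l : List (Int × Int)) (g : Int × Int → Int) :
    ∀ (init : List Int),
      (l.foldl (fun tmp ab => tmp.set ab.1.toNat (g ab)) init).length = init.length := by
  induction l with
  | nil => intro init; rfl
  | cons p t ih => intro init; simp [List.foldl_cons, ih]

def tounament (a_l : List Int) (limit : Int) : List Int :=
  -- new_l = limit // 2 ; tmp_l = [None] * new_l  (the None placeholder is 0 : Int; on Pre_
  -- every cell is assigned before the list is used)
  let new_l : Int := PySem.Int.floordiv limit 2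
  -- for a, b in enumerate(range(0, limit, 2)): tmp_l[a] = max(a_l[b], a_l[b+1])
  -- (an out-of-range a_l[b] is an IndexError in Python — outside Pre_; ported as .getD 0,
  -- and Python's out-of-range store tmp_l[a] = … — also outside Pre_ — as List.set's no-op)
  let tmp_l : List Int :=
    (PySem.List.enumerate (PySem.List.pyRange 0 limit 2) 0).foldl
      (fun tmp ab =>
        tmp.set ab.1.toNat (max (PySem.List.pyGetD a_l ab.2 0) (PySem.List.pyGetD a_l (ab.2 + 1) 0)))
      (List.replicate new_l.toNat 0)
  if tmp_l.length ≤ 2 then tmp_l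
  else tounament tmp_l (tmp_l.length : Int)
termination_by limit.toNat
decreasing_by
  rename_i h
  have hlen := pvFoldSetLen
      (PySem.List.enumerate (PySem.List.pyRange 0 limit 2) 0)
      (fun ab => max (PySem.List.pyGetD a_l ab.2 0) (PySem.List.pyGetD a_l (ab.2 + 1) 0))
      (List.replicate (PySem.Int.floordiv limit 2).toNat 0)
  simp only at hlen h ⊢
  rw [hlen] at h ⊢
  have h2 : PySem.Int.floordiv limit 2 = limit / 2 :=
    PySem.Int.floordiv_eq_ediv_of_pos (by omega)
  simp only [List.length_replicate] at h ⊢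
  rw [h2] at h ⊢
  omega

-- ===== PORT B =====
def tounament_alt (a_l : List Int) (limit : Int) : List Int :=
  if limit ≤ 0 then []
  else if limit = 2 then
    [max ((PySem.List.pyGet? a_l 0).getD 0) ((PySem.List.pyGet? a_l 1).getD 0)]
  else
    let half : Int := PySem.Int.floordiv limit 2
    [(PySem.List.max? (PySem.List.slice a_l none (some half)) (fun y => y)).getD 0,
     (PySem.List.max? (PySem.List.slice a_l (some half) (some limit)) (fun y => y)).getD 0]

-- ===== PRECONDITION & SPEC =====
-- Pre_ is exactly the set of inputs on which A returns: for limit ≥ 1 every recursive level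
-- needs an even limit and in-range indices, so A returns iff limit ≤ 0 (no rounds run) or
-- limit is a power of two 2^k (k ≥ 1; k ≤ len since 2^k ≤ len) not exceeding len(a_l); on
-- every other input A raises IndexError.
def Pre_tounament (a_l : List Int) (limit : Int) : Prop :=
  limit ≤ 0 ∨ (limit ≤ a_l.length ∧ ∃ k ≤ a_l.length, 1 ≤ k ∧ limit = ((2 ^ k : ℕ) : Int))
instance (a_l : List Int) (limit : Int) : Decidable (Pre_tounament a_l limit) := by
  unfold Pre_tounament; infer_instance
def pvWitness_tounament : List Int × Int := ([5, 1, 7, 3, 2, 9, 4, 6], 8)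
def Spec_tounament (a_l : List Int) (limit : Int) (out : List Int) : Prop := out = tounament_alt a_l limit
instance (a_l : List Int) (limit : Int) (out : List Int) : Decidable (Spec_tounament a_l limit out) := by unfold Spec_tounament; infer_instance

-- ===== CLAIM (what is proved, stated in full; the proofs are below) =====
def Claim_equal_tounament : Prop := ∀ (a_l : List Int) (limit : Int), Dom_tounament a_l limit → Pre_tounament a_l limit → Spec_tounament a_l limit (tounament a_l limit)

-- ===== LEMMAS AND PROOFS =====

-- pairwise maxima of adjacent elements (one tournament round)
def halfMax : List Int → List Int
  | [] => []
  | [_] => []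
  | x :: y :: rest => max x y :: halfMax rest

-- max(l) for nonempty l; 0 is an irrelevant default
def maxOf : List Int → Int
  | [] => 0
  | x :: xs => xs.foldl max x

theorem halfMax_length : ∀ l : List Int, (halfMax l).length = l.length / 2 := by
  intro l
  induction l using halfMax.induct with
  | case1 => simp [halfMax]
  | case2 => simp [halfMax]
  | case3 x y rest ih => simp [halfMax, ih]; omega

theorem halfMax_take : ∀ (m : ℕ) (l : List Int), halfMax (l.take (2 * m)) = (halfMax l).take m := by
  intro m
  induction m with
  | zero => intro l; simp [halfMax]
  | succ n ih =>
    intro l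
    match l with
    | [] => simp [halfMax]
    | [x] =>
      rw [List.take_of_length_le (by simp; omega)]
      simp [halfMax]
    | x :: y :: rest =>
      have h : 2 * (n + 1) = (2 * n) + 1 + 1 := by omega
      rw [h]
      simp [List.take_succ_cons, halfMax, ih rest]

theorem halfMax_drop : ∀ (m : ℕ) (l : List Int), halfMax (l.drop (2 * m)) = (halfMax l).drop m := by
  intro m
  induction m with
  | zero => intro l; simp
  | succ n ih =>
    intro l
    match l with
    | [] => simp [halfMax]
    | [x] =>
      rw [List.drop_of_length_le (by simp; omega)]
      simp [halfMax]
    | x :: y :: rest =>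
      have h : 2 * (n + 1) = (2 * n) + 1 + 1 := by omega
      rw [h]
      simp [halfMax, ih rest]

theorem foldl_max_halfMax : ∀ (l : List Int), l.length % 2 = 0 →
    ∀ a : Int, (halfMax l).foldl max a = l.foldl max a := by
  intro l
  induction l using halfMax.induct with
  | case1 => intro _ _; rfl
  | case2 x => intro h; simp at h
  | case3 x y rest ih =>
    intro hlen a
    simp only [halfMax, List.foldl_cons]
    rw [ih (by simp at hlen ⊢; omega)]
    rw [max_assoc]

theorem maxOf_halfMax (l : List Int) (h2 : l.length % 2 = 0) (hne : l ≠ []) :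
    maxOf (halfMax l) = maxOf l := by
  match l with
  | [] => exact absurd rfl hne
  | [x] => simp at h2
  | x :: y :: rest =>
    simp only [halfMax, maxOf, List.foldl_cons]
    exact foldl_max_halfMax rest (by simp at h2 ⊢; omega) (max x y)

-- writing f i into slot i of a long-enough buffer, in index order, yields the map
theorem fold_set_range (f : ℕ → Int) :
    ∀ (m : ℕ) (init : List Int), m ≤ init.length →
      (List.range m).foldl (fun t i => t.set i (f i)) init
        = (List.range m).map f ++ init.drop m := by
  intro m
  induction m with
  | zero => intro init h; simp
  | succ n ih =>
    intro init h
    rw [List.range_succ, List.foldl_append, ih init (by omega)]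
    simp only [List.foldl_cons, List.foldl_nil, List.map_append, List.map_cons, List.map_nil]
    have hd : init.drop n = init[n] :: init.drop (n + 1) :=
      List.drop_eq_getElem_cons (by omega)
    rw [hd, List.set_append_right _ _ (by simp)]
    simp only [List.length_map, List.length_range, Nat.sub_self, List.set_cons_zero]
    simp [List.append_assoc]

theorem enumerate_map_range :
    ∀ (m : ℕ) (g : ℕ → Int) (s : Int),
      PySem.List.enumerate ((List.range m).map g) s
        = (List.range m).map (fun (k : ℕ) => (s + (k : Int), g k)) := by
  intro m
  induction m with
  | zero => intro g s; simp [PySem.List.enumerate_nil]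
  | succ n ih =>
    intro g s
    rw [List.range_succ_eq_map]
    simp only [List.map_cons, List.map_map]
    rw [PySem.List.enumerate_cons, ih (g ∘ Nat.succ) (s + 1)]
    simp only [Function.comp_def, Nat.succ_eq_add_one]
    congr 1
    · simp
    · apply List.map_congr_left
      intro k _
      refine Prod.ext ?_ rfl
      push_cast
      ring

theorem map_range_eq_halfMax : ∀ (m : ℕ) (a : List Int), 2 * m ≤ a.length →
    (List.range m).map (fun k => max (a.getD (2 * k) 0) (a.getD (2 * k + 1) 0))
      = halfMax (a.take (2 * m)) := by
  intro m
  induction m with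
  | zero => intro a h; simp [halfMax]
  | succ n ih =>
    intro a h
    match a with
    | [] => simp at h
    | [x] => simp at h; omega
    | x :: y :: rest =>
      have h2 : 2 * (n + 1) = (2 * n) + 1 + 1 := by omega
      rw [List.range_succ_eq_map]
      simp only [List.map_cons, List.map_map]
      rw [h2, List.take_succ_cons, List.take_succ_cons, halfMax]
      simp only [List.length_cons] at h
      rw [← ih rest (by omega)]
      congr 1

-- the body of A's loop produces exactly one halfMax round on the first 2*m elements
theorem tmp_eq_halfMax (a : List Int) (m : ℕ) (hm : 2 * m ≤ a.length) :
    (PySem.List.enumerate (PySem.List.pyRange 0 ((2 * m : ℕ) : Int) 2) 0).foldl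
      (fun tmp ab =>
        tmp.set ab.1.toNat (max (PySem.List.pyGetD a ab.2 0) (PySem.List.pyGetD a (ab.2 + 1) 0)))
      (List.replicate (PySem.Int.floordiv ((2 * m : ℕ) : Int) 2).toNat 0)
      = halfMax (a.take (2 * m)) := by
  have hfd : PySem.Int.floordiv ((2 * m : ℕ) : Int) 2 = (m : Int) := by
    rw [show (2 : Int) = ((2 : ℕ) : Int) from rfl, PySem.Int.floordiv_natCast]
    congr 1
    omega
  have hR : PySem.List.pyRange 0 ((2 * m : ℕ) : Int) 2
      = (List.range m).map (fun (k : ℕ) => ((2 * k : ℕ) : Int)) := by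
    rw [PySem.List.pyRange_of_pos 0 ((2 * m : ℕ) : Int) (by norm_num)]
    have hN : (if (0 : Int) < ((2 * m : ℕ) : Int)
        then ((((2 * m : ℕ) : Int) - 0 + 2 - 1) / 2).toNat else 0) = m := by
      split_ifs with hpos
      · omega
      · omega
    rw [hN]
    apply List.map_congr_left
    intro k _
    push_cast
    ring
  rw [hfd, hR, enumerate_map_range]
  rw [List.foldl_map]
  have hfun : (fun (tmp : List Int) (k : ℕ) =>
        (fun tmp (ab : Int × Int) =>
          tmp.set ab.1.toNat (max (PySem.List.pyGetD a ab.2 0) (PySem.List.pyGetD a (ab.2 + 1) 0)))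
          tmp ((fun (k : ℕ) => ((0 : Int) + (k : Int), ((2 * k : ℕ) : Int))) k))
      = fun (tmp : List Int) (k : ℕ) =>
          tmp.set k (max (a.getD (2 * k) 0) (a.getD (2 * k + 1) 0)) := by
    funext tmp k
    have e1 : PySem.List.pyGetD a ((2 * k : ℕ) : Int) 0 = a.getD (2 * k) 0 := by
      rw [PySem.List.pyGetD_of_nonneg a 0 (by positivity), Int.toNat_natCast]
    have e2 : PySem.List.pyGetD a (((2 * k : ℕ) : Int) + 1) 0 = a.getD (2 * k + 1) 0 := by
      rw [PySem.List.pyGetD_of_nonneg a 0 (by positivity),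
        show (((2 * k : ℕ) : Int) + 1).toNat = 2 * k + 1 from by omega]
    simp only [e1, e2]
    congr 1
    omega
  rw [hfun]
  rw [fold_set_range _ m _ (by simp)]
  simp only [List.drop_replicate]
  rw [map_range_eq_halfMax m a hm]
  simp

-- one unfolding of A on an even limit 2*m within range
theorem tounament_step (a : List Int) (m : ℕ) (hm : 2 * m ≤ a.length) :
    tounament a ((2 * m : ℕ) : Int)
      = if (halfMax (a.take (2 * m))).length ≤ 2 then halfMax (a.take (2 * m))
        else tounament (halfMax (a.take (2 * m))) (((halfMax (a.take (2 * m))).length : ℕ) : Int) := by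
  rw [tounament]
  simp only [tmp_eq_halfMax a m hm]

theorem maxOf_getD (l : List Int) (h : l ≠ []) :
    (PySem.List.max? l (fun y => y)).getD 0 = maxOf l := by
  match l with
  | [] => exact absurd rfl h
  | x :: t => rw [PySem.List.max?_id_cons]; rfl

theorem take_ne_nil_of (l : List Int) (n : ℕ) (hn : 0 < n) (hl : l ≠ []) : l.take n ≠ [] := by
  intro h
  rcases List.take_eq_nil_iff.1 h with h' | h'
  · omega
  · exact hl h'

-- the heart: for limit = 2^j (j ≥ 2) within range, A returns the two half maxima
theorem inner : ∀ (j : ℕ), 2 ≤ j → ∀ (a : List Int), 2 ^ j ≤ a.length →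
    tounament a ((2 ^ j : ℕ) : Int)
      = [maxOf (a.take (2 ^ (j - 1))), maxOf ((a.drop (2 ^ (j - 1))).take (2 ^ (j - 1)))] := by
  intro j hj
  induction j, hj using Nat.le_induction with
  | base =>
    intro a hlen
    rcases a with _ | ⟨x, _ | ⟨y, _ | ⟨z, _ | ⟨w, rest⟩⟩⟩⟩
    · norm_num at hlen
    · norm_num at hlen
    · norm_num at hlen
    · norm_num at hlen
    · rw [show ((2 ^ 2 : ℕ) : Int) = ((2 * 2 : ℕ) : Int) from rfl,
        tounament_step (x :: y :: z :: w :: rest) 2 (by simp)]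
      have ht : (x :: y :: z :: w :: rest).take (2 * 2) = [x, y, z, w] := rfl
      rw [ht, show halfMax [x, y, z, w] = [max x y, max z w] from rfl]
      rw [if_pos (by simp)]
      have h1 : (x :: y :: z :: w :: rest).take (2 ^ (2 - 1)) = [x, y] := rfl
      have h2 : ((x :: y :: z :: w :: rest).drop (2 ^ (2 - 1))).take (2 ^ (2 - 1)) = [z, w] := rfl
      rw [h1, h2]
      rfl
  | succ j hj ih =>
    intro a hlen
    have hq4 : (4 : ℕ) ≤ 2 ^ j := by
      calc (4 : ℕ) = 2 ^ 2 := rfl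
      _ ≤ 2 ^ j := Nat.pow_le_pow_right (by norm_num) hj
    have hp : (2 : ℕ) ^ (j + 1) = 2 * 2 ^ j := by rw [pow_succ]; ring
    have hp1 : 2 * 2 ^ (j - 1) = 2 ^ j := by
      rw [← pow_succ']
      congr 1
      omega
    rw [show ((2 ^ (j + 1) : ℕ) : Int) = ((2 * 2 ^ j : ℕ) : Int) from by rw [hp],
      tounament_step a (2 ^ j) (by omega)]
    have hlt : (halfMax (a.take (2 * 2 ^ j))).length = 2 ^ j := by
      rw [halfMax_length, List.length_take]
      omega
    rw [if_neg (by omega), hlt, ih (halfMax (a.take (2 * 2 ^ j))) (le_of_eq hlt.symm)]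
    have c1 : (halfMax (a.take (2 * 2 ^ j))).take (2 ^ (j - 1)) = halfMax (a.take (2 ^ j)) := by
      rw [← halfMax_take (2 ^ (j - 1)) (a.take (2 * 2 ^ j)), hp1, List.take_take]
      have hmin : min (2 ^ j) (2 * 2 ^ j) = 2 ^ j := by omega
      rw [hmin]
    have hlen_takej : (a.take (2 ^ j)).length = 2 ^ j := by
      rw [List.length_take]
      omega
    have m1 : maxOf ((halfMax (a.take (2 * 2 ^ j))).take (2 ^ (j - 1))) = maxOf (a.take (2 ^ j)) := by
      rw [c1]
      apply maxOf_halfMax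
      · rw [hlen_takej]
        omega
      · exact take_ne_nil_of a (2 ^ j) (by omega) (List.ne_nil_of_length_pos (by omega))
    have c2 : (halfMax (a.take (2 * 2 ^ j))).drop (2 ^ (j - 1))
        = halfMax ((a.drop (2 ^ j)).take (2 ^ j)) := by
      rw [← halfMax_drop (2 ^ (j - 1)) (a.take (2 * 2 ^ j)), hp1, List.drop_take]
      have hsub : 2 * 2 ^ j - 2 ^ j = 2 ^ j := by omega
      rw [hsub]
    have hdlen : ((a.drop (2 ^ j)).take (2 ^ j)).length = 2 ^ j := by
      simp [List.length_take, List.length_drop]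
      omega
    have c3 : ((halfMax (a.take (2 * 2 ^ j))).drop (2 ^ (j - 1))).take (2 ^ (j - 1))
        = (halfMax (a.take (2 * 2 ^ j))).drop (2 ^ (j - 1)) := by
      apply List.take_of_length_le
      rw [List.length_drop, hlt]
      omega
    have m2 : maxOf (((halfMax (a.take (2 * 2 ^ j))).drop (2 ^ (j - 1))).take (2 ^ (j - 1)))
        = maxOf ((a.drop (2 ^ j)).take (2 ^ j)) := by
      rw [c3, c2]
      apply maxOf_halfMax
      · rw [hdlen]
        omega
      · intro h
        rw [h] at hdlen
        simp at hdlen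
        omega
    rw [m1, m2]
    simp only [Nat.add_sub_cancel]

-- ===== VERDICT (by name: the statement is the Claim_ definition above) =====
theorem tounament_spec : Claim_equal_tounament := by
  unfold Claim_equal_tounament
  intro a limit _ hpre
  unfold Spec_tounament
  rcases hpre with hneg | ⟨hle, k, hkle, hk1, hlim⟩
  · -- limit ≤ 0: no rounds run, both sides are []
    rw [tounament]
    have hR : PySem.List.pyRange 0 limit 2 = [] := by
      rw [PySem.List.pyRange_of_pos 0 limit (by norm_num), if_neg (by omega)]
      simp
    have hfd : PySem.Int.floordiv limit 2 = limit / 2 :=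
      PySem.Int.floordiv_eq_ediv_of_pos (by omega)
    have h0 : (PySem.Int.floordiv limit 2).toNat = 0 := by rw [hfd]; omega
    simp only [hR, PySem.List.enumerate_nil, List.foldl_nil, h0, List.replicate_zero]
    rw [tounament_alt, if_pos hneg]
    simp
  · subst hlim
    have hlen : 2 ^ k ≤ a.length := by exact_mod_cast hle
    have hane : a ≠ [] := List.ne_nil_of_length_pos (by omega)
    rcases Nat.lt_or_ge k 2 with hk2 | hk2
    · -- k = 1 : limit = 2
      have hk : k = 1 := by omega
      subst hk
      rcases a with _ | ⟨x, _ | ⟨y, rest⟩⟩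
      · norm_num at hlen
      · norm_num at hlen
      · rw [show ((2 ^ 1 : ℕ) : Int) = ((2 * 1 : ℕ) : Int) from rfl,
          tounament_step (x :: y :: rest) 1 (by simp)]
        rw [show (x :: y :: rest).take (2 * 1) = [x, y] from rfl,
          show halfMax [x, y] = [max x y] from rfl]
        rw [if_pos (by simp)]
        rw [tounament_alt]
        rw [if_neg (by norm_num), if_pos (by norm_num)]
        simp [PySem.List.pyGet?, PySem.List.pyIdx?,
          show (0 : Int) ≤ (rest.length : Int) + 1 from by positivity]
    · -- k ≥ 2 : the two half maxima
      rw [inner k hk2 a hlen]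
      have hpow : 2 * 2 ^ (k - 1) = 2 ^ k := by
        rw [← pow_succ']
        congr 1
        omega
      have hfd : PySem.Int.floordiv ((2 ^ k : ℕ) : Int) 2 = ((2 ^ (k - 1) : ℕ) : Int) := by
        rw [show (2 : Int) = ((2 : ℕ) : Int) from rfl, PySem.Int.floordiv_natCast]
        congr 1
        omega
      have hq4 : (4 : ℕ) ≤ 2 ^ k := by
        calc (4 : ℕ) = 2 ^ 2 := rfl
        _ ≤ 2 ^ k := Nat.pow_le_pow_right (by norm_num) hk2
      have hq4' : (4 : Int) ≤ ((2 ^ k : ℕ) : Int) := by exact_mod_cast hq4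
      rw [tounament_alt]
      rw [if_neg (by omega), if_neg (by omega)]
      simp only [hfd, PySem.List.slice_to_natCast, PySem.List.slice_natCast]
      have hsub : 2 ^ k - 2 ^ (k - 1) = 2 ^ (k - 1) := by omega
      rw [hsub]
      have hpos : 0 < 2 ^ (k - 1) := pow_pos (by norm_num) _
      have hdne : (a.drop (2 ^ (k - 1))).take (2 ^ (k - 1)) ≠ [] := by
        apply take_ne_nil_of _ _ hpos
        intro h
        rw [List.drop_eq_nil_iff] at h
        omega
      rw [maxOf_getD _ (take_ne_nil_of a _ hpos hane), maxOf_getD _ hdne]
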